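-- pv_equiv track=rewrite | github.com/aran-tia/python-start | day_27_problem1.py | get_number_total
-- ===== SOURCE A (Python) =====
-- def get_number_total(numbers):
--     count = {}
--
--     for n in numbers:
--         if n in count:
--             count[n] += 1
--         else:
--             count[n] = 1
--
--     total = 0
--
--     for v in count.values():
--         if v >= 2:
--             total += v
--
--     return total
-- ===== SOURCE B (Python) =====
-- def get_number_total(numbers):
--     seen = set()
--     dups = set()
--     for x in numbers:
--         if x in seen:
--             dups.add(x)
--         else:
--             seen.add(x)
--     total = 0
--     for x in numbers:
--         if x in dups:
--             total += 1
--     return total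
-- ===== Notes on version B (the rewrite author's own statement) =====
-- stated objective: alternative
-- what changed: Replaces the hash-count-then-scan-values approach with a two-set membership pass (seen/dups) and sums, over the list itself, the occurrences of duplicated values instead of summing dict counts.
import Mathlib
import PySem

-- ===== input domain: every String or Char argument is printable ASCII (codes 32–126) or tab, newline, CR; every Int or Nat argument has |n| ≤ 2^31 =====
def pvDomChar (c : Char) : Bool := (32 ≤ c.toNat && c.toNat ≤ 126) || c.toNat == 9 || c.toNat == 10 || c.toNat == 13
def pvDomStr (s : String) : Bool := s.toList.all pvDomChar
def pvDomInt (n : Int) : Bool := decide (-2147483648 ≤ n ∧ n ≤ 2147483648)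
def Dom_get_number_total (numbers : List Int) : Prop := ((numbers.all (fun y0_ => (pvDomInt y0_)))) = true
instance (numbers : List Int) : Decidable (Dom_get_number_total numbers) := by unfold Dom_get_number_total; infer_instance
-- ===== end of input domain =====

-- B replaces A's count-dict-then-scan-values with a two-set pass (seen/dups) and counts,
-- over the list itself, the occurrences of duplicated values; same O(n) cost, alternative algorithm.

-- ===== PORT A =====
def get_number_total (numbers : List Int) : Int :=
  let count := numbers.foldl
    (fun d n => if d.contains n then d.insert n (d.getD n 0 + 1) else d.insert n 1)
    PySem.Dict.empty
  (PySem.Dict.values count).foldl (fun total v => if 2 ≤ v then total + v else total) 0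

-- ===== PORT B =====
-- one step of B's first loop: if x in seen: dups.add(x) else: seen.add(x)
def pvStepB (p : PySem.Set Int × PySem.Set Int) (x : Int) : PySem.Set Int × PySem.Set Int :=
  if PySem.Set.contains p.1 x then (p.1, PySem.Set.add p.2 x) else (PySem.Set.add p.1 x, p.2)

def get_number_total_alt (numbers : List Int) : Int :=
  let sd := numbers.foldl pvStepB (PySem.Set.empty, PySem.Set.empty)
  numbers.foldl (fun total x => if PySem.Set.contains sd.2 x then total + 1 else total) 0

-- ===== PRECONDITION & SPEC =====
def Spec_get_number_total (numbers : List Int) (out : Int) : Prop := out = get_number_total_alt numbers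
instance (numbers : List Int) (out : Int) : Decidable (Spec_get_number_total numbers out) := by unfold Spec_get_number_total; infer_instance

-- ===== CLAIM (what is proved, stated in full; the proofs are below) =====
def Claim_equal_get_number_total : Prop := ∀ (numbers : List Int), Dom_get_number_total numbers → Spec_get_number_total numbers (get_number_total numbers)

-- ===== LEMMAS AND PROOFS =====

-- A's counting loop is Counter(numbers)
lemma countA_eq_counter (l : List Int) :
    l.foldl (fun d n => if d.contains n then d.insert n (d.getD n 0 + 1) else d.insert n 1)
      PySem.Dict.empty = PySem.Dict.counter l := by
  rw [← PySem.Dict.foldl_insert_getD_add_one_eq_counter]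
  apply PySem.List.foldl_congr_mem
  intro d n _
  split
  · rfl
  · rename_i h
    have h0 : d.getD n 0 = 0 := PySem.Dict.getD_of_not_contains d 0 (by simpa using h)
    rw [h0, zero_add]

-- the first component of B's first loop is the running `seen` set
lemma fstB_eq (l : List Int) : ∀ (s d : PySem.Set Int),
    (l.foldl pvStepB (s, d)).1 = l.foldl PySem.Set.add s := by
  induction l with
  | nil => intro s d; rfl
  | cons a t ih =>
    intro s d
    simp only [List.foldl_cons, pvStepB]
    by_cases h : PySem.Set.contains s a
    · rw [if_pos h, ih]
      have h' : a ∈ s := (PySem.Set.contains_iff s a).mp h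
      have : PySem.Set.add s a = s := by simp [PySem.Set.add, h']
      rw [this]
    · rw [if_neg h, ih]

-- membership in B's `dups` set is "occurs at least twice"
lemma sndB_mem (l : List Int) (x : Int) :
    x ∈ (l.foldl pvStepB (PySem.Set.empty, PySem.Set.empty)).2 ↔ 2 ≤ l.count x := by
  induction l using List.reverseRecOn with
  | nil => simp [PySem.Set.empty]
  | append_singleton t a ih =>
    rw [List.foldl_append, List.foldl_cons, List.foldl_nil]
    have hfst : (t.foldl pvStepB (PySem.Set.empty, PySem.Set.empty)).1 = PySem.Set.ofList t := by
      rw [fstB_eq, PySem.Set.ofList_eq_foldl]; rfl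
    have hcnt : (t ++ [a]).count x = t.count x + (if x = a then 1 else 0) := by
      by_cases hxa : x = a
      · subst hxa; simp [List.count_append]
      · simp [List.count_append, hxa, Ne.symm hxa]
    by_cases hmem : a ∈ t
    · have hc : PySem.Set.contains (t.foldl pvStepB (PySem.Set.empty, PySem.Set.empty)).1 a = true := by
        rw [hfst, PySem.Set.contains_iff, PySem.Set.mem_ofList]; exact hmem
      rw [pvStepB, if_pos hc, PySem.Set.mem_add, ih, hcnt]
      have h1 : 1 ≤ t.count a := List.one_le_count_iff.mpr hmem
      by_cases hxa : x = a
      · subst hxa; simp; omega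
      · simp [hxa]
    · have hc : PySem.Set.contains (t.foldl pvStepB (PySem.Set.empty, PySem.Set.empty)).1 a = false := by
        rw [hfst]
        simp [PySem.Set.mem_ofList, hmem]
      rw [pvStepB, if_neg (by rw [hc]; exact Bool.false_ne_true), ih, hcnt]
      by_cases hxa : x = a
      · subst hxa
        have h0 : t.count x = 0 := List.count_eq_zero.mpr hmem
        simp [h0]
      · simp [hxa]

-- pull an if-then-add fold into a sum of a mapped list
lemma foldl_if_add_eq_sum (L : List Int) :
    L.foldl (fun total v => if 2 ≤ v then total + v else total) 0
      = (L.map (fun v => if 2 ≤ v then v else 0)).sum := by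
  have h : (fun (total v : Int) => if 2 ≤ v then total + v else total)
      = (fun total v => total + (if 2 ≤ v then v else 0)) := by
    funext t v; split <;> simp
  rw [h, PySem.List.foldl_add]
  simp

-- a sum of (if p then f else 0) over a list is the sum of f over the filtered list
lemma sum_map_ite_eq_filter (p : Int → Bool) (f : Int → Int) (L : List Int) :
    (L.map (fun k => if p k then f k else 0)).sum = ((L.filter p).map f).sum := by
  induction L with
  | nil => rfl
  | cons a t ih =>
    by_cases h : p a <;> simp [h, ih]

-- the key multiset identity: summing counts ≥ 2 over the distinct values
-- equals counting, over the list itself, the elements whose value is duplicated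
lemma distinct_sum_eq_countP (xs : List Int) :
    ((PySem.Set.ofList xs).map (fun k => if 2 ≤ (xs.count k : Int) then (xs.count k : Int) else 0)).sum
      = (xs.countP (fun x => decide (2 ≤ xs.count x)) : Int) := by
  have hcond : (fun k => if 2 ≤ (xs.count k : Int) then (xs.count k : Int) else 0)
      = (fun k => if decide (2 ≤ xs.count k) then (xs.count k : Int) else 0) := by
    funext k
    by_cases h : 2 ≤ xs.count k
    · rw [if_pos (by exact_mod_cast h), if_pos (by simpa using h)]
    · rw [if_neg (by exact_mod_cast h), if_neg (by simpa using h)]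
  rw [hcond, sum_map_ite_eq_filter]
  have hperm : (PySem.Set.ofList xs).Perm xs.dedup := by
    apply (List.perm_ext_iff_of_nodup (PySem.Set.nodup_ofList xs) xs.nodup_dedup).mpr
    intro x
    rw [PySem.Set.mem_ofList, List.mem_dedup]
  have hperm2 := (hperm.filter (fun k => decide (2 ≤ xs.count k))).map (fun k => (xs.count k : Int))
  rw [hperm2.sum_eq]
  rw [show (fun k => ((xs.count k) : Int)) = ((Nat.cast : Nat → Int) ∘ fun k => xs.count k) from rfl,
      ← List.map_map, ← Nat.cast_list_sum,
      List.sum_map_count_dedup_filter_eq_countP]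

-- ===== VERDICT (by name: the statement is the Claim_ definition above) =====
theorem get_number_total_spec : Claim_equal_get_number_total := by
  intro numbers _
  unfold Spec_get_number_total get_number_total get_number_total_alt
  simp only
  rw [countA_eq_counter]
  rw [show (PySem.Dict.values (PySem.Dict.counter numbers))
        = (PySem.Dict.items (PySem.Dict.counter numbers)).map (·.2) from rfl,
      PySem.Dict.items_counter, List.map_map]
  rw [foldl_if_add_eq_sum, List.map_map]
  rw [show ((fun v => if 2 ≤ v then v else 0) ∘ (·.2) ∘ fun k => (k, (numbers.count k : Int)))
        = (fun k => if 2 ≤ (numbers.count k : Int) then (numbers.count k : Int) else 0) from rfl]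
  rw [distinct_sum_eq_countP]
  rw [PySem.List.foldl_if_add_one]
  simp only [zero_add]
  congr 1
  apply List.countP_congr
  intro x hx
  rw [PySem.Set.contains_iff, sndB_mem]
  simp
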